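-- pv_equiv track=rewrite | github.com/DaanZ/PostcardFormatting | generate.py | find_closest_space
-- ===== SOURCE A (Python) =====
-- def find_closest_space(line, start_index):
--     """
--     Finds the closest space character to the given start index in a string.
--
--     Args:
--         line (str): The string to search in.
--         start_index (int): The starting index to search around.
--
--     Returns:
--         int: The index of the closest space, or -1 if no space is found.
--     """
--     if not line or start_index < 0 or start_index >= len(line):
--         return -1
--
--     left_index = start_index
--     right_index = start_index
--
--     while left_index >= 0 or right_index < len(line):
--         if left_index >= 0 and line[left_index] == " ":
--             return left_index
--         if right_index < len(line) and line[right_index] == " ":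
--             return right_index
--
--         left_index -= 1
--         right_index += 1
--
--     return -1  # No space found
-- ===== SOURCE B (Python) =====
-- def find_closest_space(line, start_index):
--     if not line or start_index < 0 or start_index >= len(line):
--         return -1
--     best = None
--     for i, ch in enumerate(line):
--         if ch == " ":
--             key = (abs(i - start_index), i)
--             if best is None or key < best:
--                 best = key
--     return best[1] if best is not None else -1
-- ===== Notes on version B (the rewrite author's own statement) =====
-- stated objective: simpler
-- what changed: Replaced the symmetric expanding two-pointer scan around start_index with a single left-to-right pass over enumerate(line) keeping the running minimum of the key (abs(i - start_index), i), whose lexicographic tie-break reproduces A's left-preference.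
import Mathlib
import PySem

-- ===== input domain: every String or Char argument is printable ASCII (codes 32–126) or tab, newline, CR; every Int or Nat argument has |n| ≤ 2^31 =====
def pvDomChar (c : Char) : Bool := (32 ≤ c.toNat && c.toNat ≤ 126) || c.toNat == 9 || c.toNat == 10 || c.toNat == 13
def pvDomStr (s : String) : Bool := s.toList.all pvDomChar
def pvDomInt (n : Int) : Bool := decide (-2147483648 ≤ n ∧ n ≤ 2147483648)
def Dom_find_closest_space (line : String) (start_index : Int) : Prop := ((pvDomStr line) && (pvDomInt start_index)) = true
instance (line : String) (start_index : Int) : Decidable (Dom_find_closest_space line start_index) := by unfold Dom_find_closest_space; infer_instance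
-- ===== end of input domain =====

-- B replaces A's symmetric expanding two-pointer scan by a single left-to-right
-- argmin pass keeping the best (distance, index) key; same return value, one simple loop.

-- ===== PORT A =====
-- the while loop of A: state (left_index, right_index)
def pvALoop (cs : List Char) (l r : Int) : Int :=
  if h : 0 ≤ l ∨ r < (cs.length : Int) then
    if 0 ≤ l ∧ PySem.List.pyGet? cs l = some ' ' then l
    else if r < (cs.length : Int) ∧ PySem.List.pyGet? cs r = some ' ' then r
    else pvALoop cs (l - 1) (r + 1)
  else -1
termination_by ((l + 1).toNat + ((cs.length : Int) - r).toNat)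
decreasing_by omega

def find_closest_space (line : String) (start_index : Int) : Int :=
  if PySem.Str.len line = 0 ∨ start_index < 0 ∨ start_index ≥ (PySem.Str.len line : Int) then -1
  else pvALoop line.toList start_index start_index

-- ===== PORT B =====
-- Python tuple comparison key < best (lexicographic on (distance, index))
def pvLex (a b : Int × Int) : Bool := decide (a.1 < b.1 ∨ (a.1 = b.1 ∧ a.2 < b.2))

-- body of B's for-loop: update the running best key
def pvBStep (s : Int) (best : Option (Int × Int)) (p : Int × Char) : Option (Int × Int) :=
  if p.2 = ' ' then
    let key : Int × Int := (|p.1 - s|, p.1)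
    match best with
    | none => some key
    | some b => if pvLex key b then some key else best
  else best

-- the loop over enumerate(line) plus the final 'best[1] if best is not None else -1'
def pvBRes (cs : List Char) (s : Int) : Int :=
  match (PySem.List.enumerate cs 0).foldl (pvBStep s) none with
  | some b => b.2
  | none => -1

def find_closest_space_alt (line : String) (start_index : Int) : Int :=
  if PySem.Str.len line = 0 ∨ start_index < 0 ∨ start_index ≥ (PySem.Str.len line : Int) then -1
  else pvBRes line.toList start_index

-- ===== PRECONDITION & SPEC =====
def Spec_find_closest_space (line : String) (start_index : Int) (out : Int) : Prop := out = find_closest_space_alt line start_index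
instance (line : String) (start_index : Int) (out : Int) : Decidable (Spec_find_closest_space line start_index out) := by unfold Spec_find_closest_space; infer_instance

-- ===== CLAIM (what is proved, stated in full; the proofs are below) =====
def Claim_equal_find_closest_space : Prop := ∀ (line : String) (start_index : Int), Dom_find_closest_space line start_index → Spec_find_closest_space line start_index (find_closest_space line start_index)

-- ===== LEMMAS AND PROOFS =====

lemma pvLex_irrefl (a : Int × Int) : pvLex a a = false := by
  simp [pvLex]

lemma pvLex_asymm {a b : Int × Int} (h : pvLex a b = true) : pvLex b a = false := by
  simp [pvLex] at *; omega

lemma pvLex_le_trans {a b c : Int × Int} (h1 : pvLex b c = false) (h2 : pvLex a b = false) :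
    pvLex a c = false := by
  simp [pvLex] at *; omega

lemma pvLex_antisymm {a b : Int × Int} (h1 : pvLex a b = false) (h2 : pvLex b a = false) : a = b := by
  obtain ⟨a1, a2⟩ := a; obtain ⟨b1, b2⟩ := b
  simp [pvLex] at *
  exact ⟨by omega, by omega⟩

-- step facts
lemma pvBStep_none {s : Int} {st : Option (Int × Int)} {p : Int × Char}
    (h : pvBStep s st p = none) : st = none ∧ p.2 ≠ ' ' := by
  cases st with
  | none =>
    refine ⟨rfl, ?_⟩
    intro hsp
    simp [pvBStep, hsp] at h
  | some b =>
    exfalso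
    by_cases hsp : p.2 = ' '
    · simp only [pvBStep, if_pos hsp] at h
      split_ifs at h
    · simp [pvBStep, hsp] at h

lemma pvBStep_mem {s : Int} {st : Option (Int × Int)} {p : Int × Char} {b' : Int × Int}
    (h : pvBStep s st p = some b') : st = some b' ∨ (p.2 = ' ' ∧ b' = (|p.1 - s|, p.1)) := by
  by_cases hsp : p.2 = ' '
  · cases st with
    | none =>
      simp only [pvBStep, if_pos hsp] at h
      exact Or.inr ⟨hsp, (Option.some.injEq _ _).mp h |>.symm⟩
    | some b =>
      simp only [pvBStep, if_pos hsp] at h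
      split_ifs at h
      · exact Or.inr ⟨hsp, ((Option.some.injEq _ _).mp h).symm⟩
      · exact Or.inl h
  · simp only [pvBStep, if_neg hsp] at h
    exact Or.inl h

lemma pvBStep_le_st {s : Int} {p : Int × Char} {b0 b' : Int × Int}
    (h : pvBStep s (some b0) p = some b') : pvLex b0 b' = false := by
  by_cases hsp : p.2 = ' '
  · simp only [pvBStep, if_pos hsp] at h
    split_ifs at h with hl
    · rw [← (Option.some.injEq _ _).mp h]
      exact pvLex_asymm hl
    · rw [(Option.some.injEq _ _).mp h]
      exact pvLex_irrefl _
  · simp only [pvBStep, if_neg hsp] at h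
    rw [(Option.some.injEq _ _).mp h]
    exact pvLex_irrefl _

lemma pvBStep_le_key {s : Int} {st : Option (Int × Int)} {p : Int × Char} {b' : Int × Int}
    (hsp : p.2 = ' ') (h : pvBStep s st p = some b') : pvLex (|p.1 - s|, p.1) b' = false := by
  cases st with
  | none =>
    simp only [pvBStep, if_pos hsp] at h
    rw [← (Option.some.injEq _ _).mp h]
    exact pvLex_irrefl _
  | some b =>
    simp only [pvBStep, if_pos hsp] at h
    split_ifs at h with hl
    · rw [← (Option.some.injEq _ _).mp h]
      exact pvLex_irrefl _
    · rw [← (Option.some.injEq _ _).mp h]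
      simpa using hl

lemma foldB_min (s : Int) (L : List (Int × Char)) : ∀ (st : Option (Int × Int)),
    (L.foldl (pvBStep s) st = none → st = none ∧ ∀ p ∈ L, p.2 ≠ ' ')
  ∧ (∀ b, L.foldl (pvBStep s) st = some b →
       (st = some b ∨ ∃ p ∈ L, p.2 = ' ' ∧ b = (|p.1 - s|, p.1))
       ∧ (∀ b0, st = some b0 → pvLex b0 b = false)
       ∧ (∀ p ∈ L, p.2 = ' ' → pvLex (|p.1 - s|, p.1) b = false)) := by
  induction L with
  | nil =>
    intro st
    constructor
    · intro h; simp at h; exact ⟨h, by simp⟩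
    · intro b hb; simp at hb
      refine ⟨Or.inl hb, ?_, by simp⟩
      intro b0 h0; rw [hb] at h0
      cases h0; exact pvLex_irrefl _
  | cons p L ih =>
    intro st
    obtain ⟨ihn, ihs⟩ := ih (pvBStep s st p)
    constructor
    · intro h
      rw [List.foldl_cons] at h
      obtain ⟨h1, h2⟩ := ihn h
      obtain ⟨h3, h4⟩ := pvBStep_none h1
      exact ⟨h3, by simpa [h4] using h2⟩
    · intro b hb
      rw [List.foldl_cons] at hb
      obtain ⟨hmem, hle_st, hle_L⟩ := ihs b hb
      constructor
      · rcases hmem with hst' | ⟨q, hq, hqs, hqk⟩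
        · rcases pvBStep_mem hst' with h | ⟨hs1, hs2⟩
          · exact Or.inl h
          · exact Or.inr ⟨p, List.mem_cons_self, hs1, hs2⟩
        · exact Or.inr ⟨q, List.mem_cons_of_mem _ hq, hqs, hqk⟩
      constructor
      · intro b0 h0
        subst h0
        match h' : pvBStep s (some b0) p with
        | none => exact absurd ((pvBStep_none h').1) (by simp)
        | some b'' =>
          exact pvLex_le_trans (hle_st b'' h') (pvBStep_le_st h')
      · intro q hq hqs
        rcases List.mem_cons.mp hq with rfl | hqL
        · match h' : pvBStep s st q with
          | none => exact absurd ((pvBStep_none h').2) (by simp [hqs])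
          | some b'' =>
            exact pvLex_le_trans (hle_st b'' h') (pvBStep_le_key hqs h')
        · exact hle_L q hqL hqs

lemma pvBRes_eq_none (cs : List Char) (s : Int)
    (h : ∀ (k : Nat) (_ : k < cs.length), cs[k] ≠ ' ') : pvBRes cs s = -1 := by
  unfold pvBRes
  match hf : (PySem.List.enumerate cs 0).foldl (pvBStep s) none with
  | none => rfl
  | some b =>
    obtain ⟨hmem, _, _⟩ := (foldB_min s (PySem.List.enumerate cs 0) none).2 b hf
    rcases hmem with h' | ⟨p, hp, hps, _⟩
    · cases h'
    · rw [PySem.List.mem_enumerate_iff] at hp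
      obtain ⟨k, hk, rfl⟩ := hp
      exact absurd hps (h k hk)

lemma pvBRes_eq_of_min (cs : List Char) (s : Int) (m : Int) (hm0 : 0 ≤ m)
    (hmn : m.toNat < cs.length) (hsp : cs[m.toNat] = ' ')
    (hmin : ∀ (k : Nat) (_ : k < cs.length), cs[k] = ' ' →
      pvLex (|(k : Int) - s|, (k : Int)) (|m - s|, m) = false) :
    pvBRes cs s = m := by
  have hmem : ((0 : Int) + (m.toNat : Int), cs[m.toNat]) ∈ PySem.List.enumerate cs 0 := by
    rw [PySem.List.mem_enumerate_iff]
    exact ⟨m.toNat, hmn, rfl⟩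
  have hmc : ((m.toNat : Int)) = m := Int.toNat_of_nonneg hm0
  unfold pvBRes
  match hf : (PySem.List.enumerate cs 0).foldl (pvBStep s) none with
  | none =>
    obtain ⟨_, hno⟩ := (foldB_min s (PySem.List.enumerate cs 0) none).1 hf
    exact absurd hsp (hno _ hmem)
  | some b =>
    obtain ⟨hmemb, _, hle⟩ := (foldB_min s (PySem.List.enumerate cs 0) none).2 b hf
    have h1 : pvLex (|m - s|, m) b = false := by
      have := hle _ hmem hsp
      simpa [hmc] using this
    have h2 : pvLex b (|m - s|, m) = false := by
      rcases hmemb with h' | ⟨p, hp, hps, rfl⟩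
      · cases h'
      · rw [PySem.List.mem_enumerate_iff] at hp
        obtain ⟨k, hk, rfl⟩ := hp
        simpa using hmin k hk hps
    have : b = (|m - s|, m) := pvLex_antisymm h2 h1
    simp [this]

-- the two-pointer loop, started at offset d around s, computes B's argmin,
-- provided no space lies at distance < d from s
lemma pvALoop_eq (cs : List Char) (s : Int) (h0 : 0 ≤ s) (h1 : s < (cs.length : Int)) :
    ∀ (d : Int), 0 ≤ d →
      (∀ (k : Nat) (_ : k < cs.length), cs[k] = ' ' → d ≤ |(k : Int) - s|) →
      pvALoop cs (s - d) (s + d) = pvBRes cs s := by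
  have key : ∀ (fuel : Nat) (d : Int), 0 ≤ d →
      (∀ (k : Nat) (_ : k < cs.length), cs[k] = ' ' → d ≤ |(k : Int) - s|) →
      ((s - d + 1).toNat + ((cs.length : Int) - (s + d)).toNat) ≤ fuel →
      pvALoop cs (s - d) (s + d) = pvBRes cs s := by
    intro fuel
    induction fuel with
    | zero =>
      intro d hd hinv hm
      rw [pvALoop.eq_def]
      have hc : ¬ (0 ≤ s - d ∨ s + d < (cs.length : Int)) := by omega
      rw [dif_neg hc]
      refine (pvBRes_eq_none cs s ?_).symm
      intro k hk hkspace
      have hdk := hinv k hk hkspace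
      have ha1 := abs_nonneg ((k : Int) - s)
      have ha2 := abs_choice ((k : Int) - s)
      omega
    | succ fuel ih =>
      intro d hd hinv hm
      rw [pvALoop.eq_def]
      by_cases hc : 0 ≤ s - d ∨ s + d < (cs.length : Int)
      · rw [dif_pos hc]
        have hdabs : |(-d : Int)| = d := by rw [abs_neg, abs_of_nonneg hd]
        by_cases hl : 0 ≤ s - d ∧ PySem.List.pyGet? cs (s - d) = some ' '
        · rw [if_pos hl]
          obtain ⟨hl0, hlsp⟩ := hl
          have hlt : s - d < (cs.length : Int) := by omega
          rw [PySem.List.pyGet?_of_nonneg cs hl0] at hlsp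
          rw [List.getElem?_eq_some_iff] at hlsp
          obtain ⟨hlen', hget⟩ := hlsp
          refine (pvBRes_eq_of_min cs s (s - d) hl0 hlen' hget ?_).symm
          intro k hk hksp
          have hdk := hinv k hk hksp
          simp only [pvLex, decide_eq_false_iff_not]
          have he : s - d - s = -d := by ring
          rw [he, hdabs]
          have ha2 := abs_choice ((k : Int) - s)
          have ha1 := abs_nonneg ((k : Int) - s)
          omega
        · rw [if_neg hl]
          by_cases hr : s + d < (cs.length : Int) ∧ PySem.List.pyGet? cs (s + d) = some ' '
          · rw [if_pos hr]
            obtain ⟨hrn, hrsp⟩ := hr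
            have hr0 : 0 ≤ s + d := by omega
            rw [PySem.List.pyGet?_of_nonneg cs hr0] at hrsp
            rw [List.getElem?_eq_some_iff] at hrsp
            obtain ⟨hrlen', hget⟩ := hrsp
            refine (pvBRes_eq_of_min cs s (s + d) hr0 hrlen' hget ?_).symm
            intro k hk hksp
            have hdk := hinv k hk hksp
            -- k cannot be s - d: A already rejected the left side (or it is out of range)
            have hkne : (k : Int) ≠ s - d := by
              intro hkd
              by_cases hld : 0 ≤ s - d
              · apply hl
                refine ⟨hld, ?_⟩
                rw [PySem.List.pyGet?_of_nonneg cs hld]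
                have hnk : (s - d).toNat = k := by omega
                rw [hnk]
                simp [List.getElem?_eq_getElem hk, hksp]
              · omega
            simp only [pvLex, decide_eq_false_iff_not]
            have he : s + d - s = d := by ring
            rw [he, abs_of_nonneg hd]
            have ha2 := abs_choice ((k : Int) - s)
            have ha1 := abs_nonneg ((k : Int) - s)
            omega
          · rw [if_neg hr]
            have heq : pvALoop cs (s - d - 1) (s + d + 1)
                = pvALoop cs (s - (d + 1)) (s + (d + 1)) := by ring_nf
            rw [heq]
            refine ih (d + 1) (by omega) ?_ (by omega)
            intro k hk hksp
            have hdk := hinv k hk hksp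
            have ha2 := abs_choice ((k : Int) - s)
            have ha1 := abs_nonneg ((k : Int) - s)
            by_cases hdeq : |(k : Int) - s| = d
            · exfalso
              have hkor : (k : Int) = s - d ∨ (k : Int) = s + d := by omega
              rcases hkor with hke | hke
              · apply hl
                refine ⟨by omega, ?_⟩
                rw [PySem.List.pyGet?_of_nonneg cs (by omega)]
                have hnk : (s - d).toNat = k := by omega
                rw [hnk]
                simp [List.getElem?_eq_getElem hk, hksp]
              · apply hr
                refine ⟨by omega, ?_⟩
                rw [PySem.List.pyGet?_of_nonneg cs (by omega)]
                have hnk : (s + d).toNat = k := by omega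
                rw [hnk]
                simp [List.getElem?_eq_getElem hk, hksp]
            · omega
      · rw [dif_neg hc]
        refine (pvBRes_eq_none cs s ?_).symm
        intro k hk hkspace
        have hdk := hinv k hk hkspace
        have ha1 := abs_nonneg ((k : Int) - s)
        have ha2 := abs_choice ((k : Int) - s)
        omega
  intro d hd hinv
  exact key ((s - d + 1).toNat + ((cs.length : Int) - (s + d)).toNat) d hd hinv le_rfl

-- ===== VERDICT (by name: the statement is the Claim_ definition above) =====
theorem find_closest_space_spec : Claim_equal_find_closest_space := by
  unfold Claim_equal_find_closest_space Spec_find_closest_space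
  intro line s _
  unfold find_closest_space find_closest_space_alt
  by_cases hg : PySem.Str.len line = 0 ∨ s < 0 ∨ s ≥ (PySem.Str.len line : Int)
  · rw [if_pos hg, if_pos hg]
  · rw [if_neg hg, if_neg hg]
    simp only [not_or, not_lt, not_le, ge_iff_le] at hg
    obtain ⟨hne, hs0, hsn⟩ := hg
    have hlen : PySem.Str.len line = line.toList.length := PySem.Str.len_eq line
    rw [hlen] at hsn
    have := pvALoop_eq line.toList s hs0 (by omega) 0 le_rfl
      (by intro k hk _; exact abs_nonneg _)
    simpa using this
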